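-- pv_equiv track=rewrite | github.com/WhiteMetagross/BabyMambaHAR | scripts/benchmarkLatency.py | calculate_tinierhar_macs
-- ===== SOURCE A (Python) =====
-- from typing import Dict, List, Tuple, Any
--
-- def calculate_tinierhar_macs(T: int, C: int, nb_filters: int, nb_blocks: int, gru_units: int) -> Dict[str, int]:
--     """
--     Calculate theoretical MACs for TinierHAR.
--
--     Architecture:
--     1. DepthwiseSeparableConv2D blocks (with MaxPool on first 2)
--     2. Bidirectional GRU
--     3. Temporal Attention
--     4. Classifier
--
--     Key formula for GRU (3 gates: reset, update, new):
--         MACs_GRU = T × 3 × (H² + H×D)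
--         where H=hidden_size, D=input_dim
--         For BiGRU: multiply by 2
--     """
--     macs = {}
--
--     # ===== CONV BLOCKS =====
--     # Block 1: 1 → nb_filters, with maxpool (T/2)
--     # DW-Sep = DW + PW
--     conv_block1_dw = T * 1 * 5  # kernel=5, groups=1
--     conv_block1_pw = T * 1 * nb_filters
--
--     # After maxpool: T' = T/2
--     T1 = T // 2
--
--     # Block 2: nb_filters → 2*nb_filters, with maxpool (T/4)
--     conv_block2_dw = T1 * nb_filters * 5
--     conv_block2_pw = T1 * nb_filters * (2 * nb_filters)
--
--     T2 = T1 // 2  # T/4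
--
--     # Blocks 3-4: 2*nb_filters → 2*nb_filters, no maxpool
--     conv_blocks_34 = 0
--     for _ in range(nb_blocks - 2):
--         conv_blocks_34 += T2 * (2 * nb_filters) * 5  # DW
--         conv_blocks_34 += T2 * (2 * nb_filters) * (2 * nb_filters)  # PW
--
--     # Shortcut convs (1x1 for channel mismatch)
--     shortcut1 = T * 1 * nb_filters  # Block 1 shortcut
--     shortcut2 = T1 * nb_filters * (2 * nb_filters)  # Block 2 shortcut
--
--     macs['conv_blocks'] = (conv_block1_dw + conv_block1_pw +
--                            conv_block2_dw + conv_block2_pw +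
--                            conv_blocks_34 + shortcut1 + shortcut2)
--
--     # ===== BIDIRECTIONAL GRU =====
--     # Input dim to GRU: 2*nb_filters * C (flattened)
--     gru_input_dim = 2 * nb_filters * C
--     H = gru_units
--
--     # GRU has 3 gates (reset, update, new)
--     # Each gate: input→hidden (D×H) + hidden→hidden (H×H)
--     # Per direction, per timestep: 3 × (D×H + H×H)
--     gru_per_step = 3 * (gru_input_dim * H + H * H)
--
--     # BiGRU: 2 directions × T2 timesteps
--     macs['gru'] = 2 * T2 * gru_per_step
--
--     # ===== TEMPORAL ATTENTION =====
--     # Linear(2H → 1) for attention weights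
--     attn_dim = 2 * H
--     macs['attention'] = T2 * attn_dim * 1 + T2 * attn_dim  # Score + weighted sum
--
--     # ===== CLASSIFIER =====
--     macs['classifier'] = 2 * H * 6  # 2H → num_classes
--
--     macs['total'] = macs['conv_blocks'] + macs['gru'] + macs['attention'] + macs['classifier']
--
--     return macs
-- ===== SOURCE B (Python) =====
-- def calculate_tinierhar_macs(T: int, C: int, nb_filters: int, nb_blocks: int, gru_units: int) -> dict:
--     # Closed-form: the per-block cost of blocks 3..nb_blocks is constant, so the
--     # loop collapses to a single multiplication by max(nb_blocks - 2, 0).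
--     T1 = T // 2
--     T2 = T1 // 2
--     F2 = 2 * nb_filters
--     conv_blocks = (T * 5 + T * nb_filters                 # block 1 (dw + pw)
--                    + T1 * nb_filters * 5 + T1 * nb_filters * F2   # block 2
--                    + max(nb_blocks - 2, 0) * (T2 * F2 * 5 + T2 * F2 * F2)  # blocks 3..n
--                    + T * nb_filters                        # shortcut 1
--                    + T1 * nb_filters * F2)                 # shortcut 2
--     H = gru_units
--     gru = 2 * T2 * 3 * (F2 * C * H + H * H)
--     attention = T2 * 2 * H + T2 * 2 * H
--     classifier = 2 * H * 6
--     return {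
--         'conv_blocks': conv_blocks,
--         'gru': gru,
--         'attention': attention,
--         'classifier': classifier,
--         'total': conv_blocks + gru + attention + classifier,
--     }
-- ===== Notes on version B (the rewrite author's own statement) =====
-- stated objective: faster
-- what changed: Replaces the per-block summing loop with a single closed-form multiplication by max(nb_blocks-2, 0) and builds the result dict in one literal instead of incremental inserts and re-lookups.
import Mathlib
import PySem

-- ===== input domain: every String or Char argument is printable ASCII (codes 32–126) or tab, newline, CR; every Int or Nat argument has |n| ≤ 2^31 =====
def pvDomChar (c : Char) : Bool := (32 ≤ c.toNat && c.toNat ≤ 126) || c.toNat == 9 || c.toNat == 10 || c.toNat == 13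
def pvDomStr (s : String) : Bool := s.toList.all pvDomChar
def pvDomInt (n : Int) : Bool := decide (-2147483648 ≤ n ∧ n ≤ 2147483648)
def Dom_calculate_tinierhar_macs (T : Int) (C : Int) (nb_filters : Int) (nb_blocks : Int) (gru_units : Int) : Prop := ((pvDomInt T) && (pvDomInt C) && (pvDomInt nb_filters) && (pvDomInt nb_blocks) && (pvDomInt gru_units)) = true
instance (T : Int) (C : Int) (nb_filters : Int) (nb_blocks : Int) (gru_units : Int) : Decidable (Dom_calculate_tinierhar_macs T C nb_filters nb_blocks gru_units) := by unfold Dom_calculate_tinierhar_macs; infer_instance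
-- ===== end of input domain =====

-- B replaces A's per-block summing loop with one closed-form multiplication by
-- max(nb_blocks-2, 0) and builds the dict as one literal (objective: faster, O(1) vs O(nb_blocks)).

-- ===== PORT A =====
def calculate_tinierhar_macs (T : Int) (C : Int) (nb_filters : Int) (nb_blocks : Int) (gru_units : Int) : List (String × Int) :=
  let macs : PySem.Dict String Int := PySem.Dict.empty
  let conv_block1_dw := T * 1 * 5
  let conv_block1_pw := T * 1 * nb_filters
  let T1 := PySem.Int.floordiv T 2
  let conv_block2_dw := T1 * nb_filters * 5
  let conv_block2_pw := T1 * nb_filters * (2 * nb_filters)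
  let T2 := PySem.Int.floordiv T1 2
  let conv_blocks_34 := (PySem.List.pyRange 0 (nb_blocks - 2) 1).foldl
    (fun acc _ => acc + T2 * (2 * nb_filters) * 5 + T2 * (2 * nb_filters) * (2 * nb_filters)) 0
  let shortcut1 := T * 1 * nb_filters
  let shortcut2 := T1 * nb_filters * (2 * nb_filters)
  let macs := macs.insert "conv_blocks" (conv_block1_dw + conv_block1_pw +
    conv_block2_dw + conv_block2_pw + conv_blocks_34 + shortcut1 + shortcut2)
  let gru_input_dim := 2 * nb_filters * C
  let H := gru_units
  let gru_per_step := 3 * (gru_input_dim * H + H * H)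
  let macs := macs.insert "gru" (2 * T2 * gru_per_step)
  let attn_dim := 2 * H
  let macs := macs.insert "attention" (T2 * attn_dim * 1 + T2 * attn_dim)
  let macs := macs.insert "classifier" (2 * H * 6)
  -- macs[k]: the four keys were just inserted, so getD 0 is exact here
  let macs := macs.insert "total" (macs.getD "conv_blocks" 0 + macs.getD "gru" 0 +
    macs.getD "attention" 0 + macs.getD "classifier" 0)
  macs.items

-- ===== PORT B =====
def calculate_tinierhar_macs_alt (T : Int) (C : Int) (nb_filters : Int) (nb_blocks : Int) (gru_units : Int) : List (String × Int) :=
  let T1 := PySem.Int.floordiv T 2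
  let T2 := PySem.Int.floordiv T1 2
  let F2 := 2 * nb_filters
  let conv_blocks := T * 5 + T * nb_filters
    + T1 * nb_filters * 5 + T1 * nb_filters * F2
    + max (nb_blocks - 2) 0 * (T2 * F2 * 5 + T2 * F2 * F2)
    + T * nb_filters + T1 * nb_filters * F2
  let H := gru_units
  let gru := 2 * T2 * 3 * (F2 * C * H + H * H)
  let attention := T2 * 2 * H + T2 * 2 * H
  let classifier := 2 * H * 6
  [("conv_blocks", conv_blocks), ("gru", gru), ("attention", attention),
   ("classifier", classifier), ("total", conv_blocks + gru + attention + classifier)]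

-- ===== PRECONDITION & SPEC =====
def Spec_calculate_tinierhar_macs (T : Int) (C : Int) (nb_filters : Int) (nb_blocks : Int) (gru_units : Int) (out : List (String × Int)) : Prop := out = calculate_tinierhar_macs_alt T C nb_filters nb_blocks gru_units
instance (T : Int) (C : Int) (nb_filters : Int) (nb_blocks : Int) (gru_units : Int) (out : List (String × Int)) : Decidable (Spec_calculate_tinierhar_macs T C nb_filters nb_blocks gru_units out) := by unfold Spec_calculate_tinierhar_macs; infer_instance

-- ===== CLAIM (what is proved, stated in full; the proofs are below) =====
def Claim_equal_calculate_tinierhar_macs : Prop := ∀ (T : Int) (C : Int) (nb_filters : Int) (nb_blocks : Int) (gru_units : Int), Dom_calculate_tinierhar_macs T C nb_filters nb_blocks gru_units → Spec_calculate_tinierhar_macs T C nb_filters nb_blocks gru_units (calculate_tinierhar_macs T C nb_filters nb_blocks gru_units)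

-- ===== LEMMAS AND PROOFS =====

-- Folding a constant increment (two summands, as in A's loop body) adds length-many copies.
theorem foldl_const_add2_int (c1 c2 : Int) (l : List Int) (x : Int) :
    l.foldl (fun acc _ => acc + c1 + c2) x = x + l.length * (c1 + c2) := by
  induction l generalizing x with
  | nil => simp
  | cons h t ih => simp [List.foldl, ih]; ring

theorem loop_closed_form (c1 c2 n : Int) :
    (PySem.List.pyRange 0 n 1).foldl (fun acc _ => acc + c1 + c2) 0 = max n 0 * (c1 + c2) := by
  rw [foldl_const_add2_int, PySem.List.length_pyRange_one, zero_add]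
  congr 1
  omega

-- ===== VERDICT (by name: the statement is the Claim_ definition above) =====
theorem calculate_tinierhar_macs_spec : Claim_equal_calculate_tinierhar_macs := by
  intro T C nb_filters nb_blocks gru_units _
  unfold Spec_calculate_tinierhar_macs calculate_tinierhar_macs calculate_tinierhar_macs_alt
  simp only [loop_closed_form]
  simp [PySem.Dict.empty, PySem.Dict.insert, PySem.Dict.getD, PySem.Dict.get?]
  and_intros <;> ring
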